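-- pv_equiv track=rewrite | github.com/981377660LMT/algorithm-study | 20_杂题/牛客编程巅峰赛/69_树节点价值和-层序等差数列.py | tree4
-- ===== SOURCE A (Python) =====
-- from math import floor, log2
--
-- MOD = 998244353
--
-- def tree4(n: int) -> int:
--     res = 0
--     TREE_DEPTH = floor(log2(n)) + 1
--     depth, left, right = 1, 1, 1
--     while depth <= TREE_DEPTH:
--         res += depth * (left + right) * (right - left + 1) // 2
--         res %= MOD
--         depth += 1
--         left, right = min(n, left << 1), min(n, right << 1 | 1)
--     return res % MOD
-- ===== SOURCE B (Python) =====
-- MOD = 998244353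
--
-- def tree4(n: int) -> int:
--     # Abel summation: each node i contributes i once for every level d <= depth(i),
--     # so the answer is sum over levels d of (sum of all node values with depth >= d)
--     # = sum over powers p = 2^(d-1) <= n of (T(n) - T(p-1)), T(m) = m*(m+1)//2.
--     total = n * (n + 1) // 2
--     res = 0
--     for d in range(n.bit_length()):
--         p = 1 << d
--         res = (res + total - p * (p - 1) // 2) % MOD
--     return res % MOD
-- ===== Notes on version B (the rewrite author's own statement) =====
-- stated objective: simpler
-- what changed: B replaces A's per-level loop (depth counter plus clamped left/right bounds, adding depth * arithmetic-series per level) with an Abel summation: for each power p = 2^d <= n it adds the suffix mass T(n) - T(p-1) with T(m)=m*(m+1)//2, needing no depth weight and no left/right clamping state.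
-- outside the precondition, e.g. on tree4(0): A raises ValueError, B returns 0; on tree4(-3): A raises ValueError, B returns 5
import Mathlib
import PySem

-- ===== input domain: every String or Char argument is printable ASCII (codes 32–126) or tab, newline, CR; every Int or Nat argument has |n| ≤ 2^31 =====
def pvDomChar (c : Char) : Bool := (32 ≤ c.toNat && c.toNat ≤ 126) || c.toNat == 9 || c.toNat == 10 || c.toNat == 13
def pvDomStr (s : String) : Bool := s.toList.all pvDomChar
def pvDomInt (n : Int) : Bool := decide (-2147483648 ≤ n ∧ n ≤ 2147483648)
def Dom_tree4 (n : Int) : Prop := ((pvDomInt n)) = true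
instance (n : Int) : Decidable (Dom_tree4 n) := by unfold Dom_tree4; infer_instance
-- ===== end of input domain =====

-- B replaces A's depth-weighted per-level arithmetic series with an Abel-summation over
-- suffix masses T(n) - T(2^d - 1); same O(log n) cost, shorter and with no left/right clamping state.

-- ===== PORT A =====
-- A's loop body, state (left, right, res).
def tree4Step (n : Int) (st : Int × Int × Int) (depth : Int) : Int × Int × Int :=
  (min n (st.1 * 2), min n (st.2.1 * 2 + 1),
   PySem.Int.mod (st.2.2 + PySem.Int.floordiv (depth * (st.1 + st.2.1) * (st.2.1 - st.1 + 1)) 2) 998244353)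

-- floor(log2(n)) + 1 is ported as bitLength n: exact for every n ≥ 1 admitted by Dom_tree4
-- (|n| ≤ 2^31, where float log2 is exact at this granularity); n ≤ 0 raises in Python (outside Pre_).
def tree4 (n : Int) : Int :=
  PySem.Int.mod
    ((PySem.List.pyRange 1 ((PySem.Int.bitLength n : Int) + 1) 1).foldl (tree4Step n) (1, 1, 0)).2.2
    998244353

-- ===== PORT B =====
def tree4AltStep (total : Int) (res : Int) (d : Int) : Int :=
  let p : Int := 2 ^ d.toNat   -- 1 << d
  PySem.Int.mod (res + total - PySem.Int.floordiv (p * (p - 1)) 2) 998244353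

def tree4_alt (n : Int) : Int :=
  PySem.Int.mod
    ((PySem.List.pyRange 0 (PySem.Int.bitLength n : Int) 1).foldl
        (tree4AltStep (PySem.Int.floordiv (n * (n + 1)) 2)) 0)
    998244353

-- ===== PRECONDITION & SPEC =====
-- A raises ValueError (math domain error of log2) for n ≤ 0; Pre_ excludes exactly those inputs.
def Pre_tree4 (n : Int) : Prop := 1 ≤ n
instance (n : Int) : Decidable (Pre_tree4 n) := by unfold Pre_tree4; infer_instance
def pvWitness_tree4 : Int := (5)

def Spec_tree4 (n : Int) (out : Int) : Prop := out = tree4_alt n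
instance (n : Int) (out : Int) : Decidable (Spec_tree4 n out) := by unfold Spec_tree4; infer_instance

-- ===== CLAIM (what is proved, stated in full; the proofs are below) =====
def Claim_equal_tree4 : Prop := ∀ (n : Int), Dom_tree4 n → Pre_tree4 n → Spec_tree4 n (tree4 n)

-- ===== LEMMAS AND PROOFS =====

-- (X % M + t) % M = (X + t) % M
lemma emod_absorb (X t M : Int) : (X % M + t) % M = (X + t) % M := by
  conv_rhs => rw [Int.add_emod]
  rw [Int.add_emod (X % M)]
  simp [Int.emod_emod_of_dvd]

-- exact halving of an even floordiv
lemma floordiv_two_of_even (a : Int) (h : (2:Int) ∣ a) :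
    2 * PySem.Int.floordiv a 2 = a := by
  rw [PySem.Int.floordiv_eq_ediv_of_pos (by norm_num)]
  exact Int.mul_ediv_cancel' h

lemma even_mid (l r : Int) : (2:Int) ∣ ((l + r) * (r - l + 1)) := by
  obtain ⟨a, ha⟩ | ⟨a, ha⟩ := Int.even_or_odd l <;>
    obtain ⟨b, hb⟩ | ⟨b, hb⟩ := Int.even_or_odd r
  · exact ⟨(a + b) * (r - l + 1), by rw [ha, hb]; ring⟩
  · exact ⟨(l + r) * (b - a + 1), by rw [ha, hb]; ring⟩
  · exact ⟨(l + r) * (b - a), by rw [ha, hb]; ring⟩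
  · exact ⟨(a + b + 1) * (r - l + 1), by rw [ha, hb]; ring⟩

lemma even_consec (x : Int) : (2:Int) ∣ (x * (x - 1)) := by
  obtain ⟨a, ha⟩ | ⟨a, ha⟩ := Int.even_or_odd x
  · exact ⟨a * (x - 1), by rw [ha]; ring⟩
  · exact ⟨x * a, by rw [ha]; ring⟩

-- n < 2 ^ bitLength n  (Int form)
lemma lt_pow_bitLength (n : Int) (hn : 1 ≤ n) : n < 2 ^ PySem.Int.bitLength n := by
  have h := PySem.Int.lt_two_pow_bitLength n
  have h2 : ((n.natAbs : Int)) < (2:Int) ^ PySem.Int.bitLength n := by exact_mod_cast h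
  omega

lemma two_pow_le (n : Int) (hn : 1 ≤ n) (k : Nat) (hk : k + 1 ≤ PySem.Int.bitLength n) :
    (2:Int) ^ k ≤ n := by
  have h := PySem.Int.two_pow_bitLength_le n (by omega)
  have h1 : (2:Nat) ^ k ≤ 2 ^ (PySem.Int.bitLength n - 1) := Nat.pow_le_pow_right (by norm_num) (by omega)
  have h2 : ((2:Int) ^ k) ≤ (n.natAbs : Int) := by exact_mod_cast le_trans h1 h
  omega

-- the joint loop invariant: A's state after k levels vs B's accumulator after k terms
lemma loop_inv (n : Int) (hn : 1 ≤ n) (k : Nat) (hk : k ≤ PySem.Int.bitLength n) :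
    (PySem.List.pyRange 1 ((k : Int) + 1) 1).foldl (tree4Step n) (1, 1, 0)
      = (min n (2 ^ k), min n (2 ^ (k + 1) - 1),
         ((PySem.List.pyRange 0 (k : Int) 1).foldl
             (tree4AltStep (PySem.Int.floordiv (n * (n + 1)) 2)) 0
           + (k : Int) * (PySem.Int.floordiv (min n (2 ^ k - 1) * (min n (2 ^ k - 1) + 1)) 2
                          - PySem.Int.floordiv (n * (n + 1)) 2)) % 998244353) := by
  induction k with
  | zero =>
      rw [show ((0 : Nat) : Int) = 0 by norm_num, show (0:Int) + 1 = 1 by norm_num]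
      rw [PySem.List.pyRange_one_eq_nil (le_refl (1:Int)),
          PySem.List.pyRange_one_eq_nil (le_refl (0:Int))]
      simp only [List.foldl_nil, pow_zero, zero_add, pow_one, zero_mul, add_zero]
      have h1 : min n 1 = 1 := by omega
      have h2 : min n (2 - 1) = 1 := by omega
      rw [h1, h2]
      norm_num
  | succ k ih =>
      have hk' : k ≤ PySem.Int.bitLength n := by omega
      have h2k : (2:Int) ^ k ≤ n := two_pow_le n hn k hk
      have hp1 : (1:Int) ≤ 2 ^ k := one_le_pow₀ (by norm_num)
      have hc : ((k + 1 : Nat) : Int) = (k : Int) + 1 := by push_cast; ring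
      rw [hc]
      rw [PySem.List.pyRange_one_succ_right (by omega : (1:Int) ≤ (k : Int) + 1),
          PySem.List.pyRange_one_succ_right (by omega : (0:Int) ≤ (k : Int))]
      rw [List.foldl_append, List.foldl_append, ih hk']
      simp only [List.foldl_cons, List.foldl_nil]
      simp only [tree4Step, tree4AltStep, Int.toNat_natCast]
      have e1 : (2:Int) ^ (k + 1) = 2 * 2 ^ k := by ring
      have e2 : (2:Int) ^ (k + 1 + 1) = 4 * 2 ^ k := by ring
      have hminl : min n ((2:Int) ^ k) = 2 ^ k := min_eq_right h2k
      have hmin1 : min n ((2:Int) ^ k - 1) = 2 ^ k - 1 := by omega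
      refine Prod.ext ?_ (Prod.ext ?_ ?_)
      · show min n (min n (2 ^ k) * 2) = min n (2 ^ (k + 1))
        rw [hminl, e1]; omega
      · show min n (min n (2 ^ (k + 1) - 1) * 2 + 1) = min n (2 ^ (k + 1 + 1) - 1)
        rw [e1, e2]; omega
      · show PySem.Int.mod _ 998244353 = _
        rw [hminl, hmin1]
        rw [PySem.Int.mod_eq_emod_of_pos (by norm_num),
            PySem.Int.mod_eq_emod_of_pos (by norm_num)]
        rw [emod_absorb, emod_absorb]
        have hmin1' : min n ((2:Int) ^ (k + 1) - 1) ≤ n := by omega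
        set R := min n ((2:Int) ^ (k + 1) - 1) with hR
        set P := (2:Int) ^ k with hP
        set K := (k : Int) with hK
        set N := n with hN
        obtain ⟨cA, hcA⟩ := even_mid P R
        have hA : 2 * PySem.Int.floordiv ((K + 1) * (P + R) * (R - P + 1)) 2
            = (K + 1) * (P + R) * (R - P + 1) :=
          floordiv_two_of_even _ ⟨(K + 1) * cA, by linear_combination (K + 1) * hcA⟩
        obtain ⟨cB, hcB⟩ := even_consec (N + 1)
        have hB : 2 * PySem.Int.floordiv (N * (N + 1)) 2 = N * (N + 1) :=
          floordiv_two_of_even _ ⟨cB, by linear_combination hcB⟩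
        obtain ⟨cC, hcC⟩ := even_consec P
        have hC : 2 * PySem.Int.floordiv ((P - 1) * (P - 1 + 1)) 2 = (P - 1) * (P - 1 + 1) :=
          floordiv_two_of_even _ ⟨cC, by linear_combination hcC⟩
        have hD : 2 * PySem.Int.floordiv (P * (P - 1)) 2 = P * (P - 1) :=
          floordiv_two_of_even _ ⟨cC, by linear_combination hcC⟩
        obtain ⟨cE, hcE⟩ := even_consec (R + 1)
        have hE : 2 * PySem.Int.floordiv (R * (R + 1)) 2 = R * (R + 1) :=
          floordiv_two_of_even _ ⟨cE, by linear_combination hcE⟩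
        congr 1
        apply mul_left_cancel₀ (by norm_num : (2:Int) ≠ 0)
        linear_combination K * hC + hA + hD - (K + 1) * hE

-- ===== VERDICT (by name: the statement is the Claim_ definition above) =====
theorem tree4_spec : Claim_equal_tree4 := by
  intro n _ hn
  unfold Spec_tree4 tree4 tree4_alt
  have hL := loop_inv n hn (PySem.Int.bitLength n) le_rfl
  rw [hL]
  have hlt : n < 2 ^ PySem.Int.bitLength n := lt_pow_bitLength n hn
  have hmin : min n (2 ^ PySem.Int.bitLength n - 1) = n := by omega
  rw [hmin, sub_self, mul_zero, add_zero,
      PySem.Int.mod_eq_emod_of_pos (by norm_num), PySem.Int.mod_eq_emod_of_pos (by norm_num)]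
  exact Int.emod_emod_of_dvd _ dvd_rfl
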